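-- pv_equiv track=rewrite | github.com/shizmob/smol | smol/parse.py | has_good_subordening
-- ===== SOURCE A (Python) =====
-- def has_good_subordening(needles, haystack):
--     haylist = [x[0] for x in haystack]
--     prevind = 0
--     for lib in needles:
--         curind = None
--         try:
--             curind = haylist.index(lib)
--         except ValueError: # not in haystack --> eh, let's ignore
--             continue
--
--         if curind < prevind:
--             return False
--         prevind = curind
--     return True
-- ===== SOURCE B (Python) =====
-- def has_good_subordening(needles, haystack):
--     haylist = [x[0] for x in haystack]
--     indices = [haylist.index(lib) for lib in needles if lib in haylist]
--     return indices == sorted(indices)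
-- ===== Notes on version B (the rewrite author's own statement) =====
-- stated objective: simpler
-- what changed: Replaces the running-max short-circuit scan over prevind by collecting the first-occurrence indices of the present needles and comparing that list with its sorted copy.
import Mathlib
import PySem

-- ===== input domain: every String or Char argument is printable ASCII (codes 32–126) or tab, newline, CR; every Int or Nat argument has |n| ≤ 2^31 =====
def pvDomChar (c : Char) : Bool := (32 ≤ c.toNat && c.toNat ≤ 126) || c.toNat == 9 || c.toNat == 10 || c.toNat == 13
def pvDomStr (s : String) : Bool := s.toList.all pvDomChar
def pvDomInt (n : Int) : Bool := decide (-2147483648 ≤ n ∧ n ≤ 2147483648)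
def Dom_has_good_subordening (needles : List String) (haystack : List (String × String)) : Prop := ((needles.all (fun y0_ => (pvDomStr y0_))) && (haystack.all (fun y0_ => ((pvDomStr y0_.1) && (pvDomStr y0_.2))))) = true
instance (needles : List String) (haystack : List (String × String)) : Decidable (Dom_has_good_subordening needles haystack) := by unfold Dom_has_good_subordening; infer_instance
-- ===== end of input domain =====

-- B replaces A's running-max short-circuit scan by collecting the first-occurrence
-- indices of the present needles and comparing that list with its sorted copy (objective: simpler).


-- ===== PORT A =====
-- the for-loop of A, carrying prevind; haylist.index(lib) raising ValueError = index? returning none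
def hgsLoopA (haylist : List String) (prevind : Nat) : List String → Bool
  | [] => true
  | lib :: rest =>
    match PySem.List.index? haylist lib with
    | none => hgsLoopA haylist prevind rest          -- continue
    | some curind =>
      if curind < prevind then false
      else hgsLoopA haylist curind rest

def has_good_subordening (needles : List String) (haystack : List (String × String)) : Bool :=
  hgsLoopA (haystack.map (fun x => x.1)) 0 needles

-- ===== PORT B =====
def has_good_subordening_alt (needles : List String) (haystack : List (String × String)) : Bool :=
  let haylist := haystack.map (fun x => x.1)
  -- [haylist.index(lib) for lib in needles if lib in haylist]: index? is none exactly when lib ∉ haylist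
  let indices := needles.filterMap (fun lib => PySem.List.index? haylist lib)
  decide (indices = PySem.List.sorted indices (fun x => x) false)

-- ===== PRECONDITION & SPEC =====
def Spec_has_good_subordening (needles : List String) (haystack : List (String × String)) (out : Bool) : Prop := out = has_good_subordening_alt needles haystack
instance (needles : List String) (haystack : List (String × String)) (out : Bool) : Decidable (Spec_has_good_subordening needles haystack out) := by unfold Spec_has_good_subordening; infer_instance

-- ===== CLAIM (what is proved, stated in full; the proofs are below) =====
def Claim_equal_has_good_subordening : Prop := ∀ (needles : List String) (haystack : List (String × String)), Dom_has_good_subordening needles haystack → Spec_has_good_subordening needles haystack (has_good_subordening needles haystack)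

-- ===== LEMMAS AND PROOFS =====

-- A's loop decides "prevind followed by the found indices is nondecreasing"
theorem hgsLoopA_eq_pairwise (haylist : List String) (prevind : Nat) (ns : List String) :
    hgsLoopA haylist prevind ns
      = decide (List.Pairwise (· ≤ ·) (prevind :: ns.filterMap (fun lib => PySem.List.index? haylist lib))) := by
  induction ns generalizing prevind with
  | nil => simp [hgsLoopA]
  | cons lib rest ih =>
    cases h : PySem.List.index? haylist lib with
    | none => simp only [hgsLoopA, List.filterMap_cons, h]; exact ih prevind
    | some curind =>
      simp only [hgsLoopA, List.filterMap_cons, h]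
      by_cases hlt : curind < prevind
      · have hnp : ¬ (prevind :: curind :: rest.filterMap (fun lib => PySem.List.index? haylist lib)).Pairwise (· ≤ ·) := by
          intro hp
          have := (List.pairwise_cons.mp hp).1 curind (List.mem_cons_self)
          omega
        simp only [hlt, if_true, decide_eq_false hnp]
      · have hle : prevind ≤ curind := Nat.le_of_not_lt hlt
        have hiff : (prevind :: curind :: rest.filterMap (fun lib => PySem.List.index? haylist lib)).Pairwise (· ≤ ·)
            ↔ (curind :: rest.filterMap (fun lib => PySem.List.index? haylist lib)).Pairwise (· ≤ ·) := by
          constructor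
          · intro hp; exact (List.pairwise_cons.mp hp).2
          · intro hp
            refine List.pairwise_cons.mpr ⟨?_, hp⟩
            intro b hb
            rcases List.mem_cons.mp hb with rfl | hb
            · exact hle
            · exact le_trans hle ((List.pairwise_cons.mp hp).1 b hb)
        simp only [hlt, if_false, ih curind]
        exact (decide_eq_decide.mpr hiff).symm

-- a list of Nats equals its (stable) sort iff it is nondecreasing
theorem eq_sorted_iff_pairwise (l : List Nat) :
    (l = PySem.List.sorted l (fun x => x) false) ↔ l.Pairwise (· ≤ ·) := by
  constructor
  · intro h
    rw [h]
    exact PySem.List.sorted_pairwise l (fun x => x)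
  · intro h
    exact (PySem.List.sorted_eq_self_of_pairwise l (fun x => x) h).symm

-- ===== VERDICT (by name: the statement is the Claim_ definition above) =====
theorem has_good_subordening_spec : Claim_equal_has_good_subordening := by
  intro needles haystack _
  unfold Spec_has_good_subordening has_good_subordening has_good_subordening_alt
  rw [hgsLoopA_eq_pairwise]
  refine decide_eq_decide.mpr ?_
  rw [eq_sorted_iff_pairwise, List.pairwise_cons]
  simp
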